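-- pv_equiv track=rewrite | github.com/vdakov/AOC_2022 | src/PythonSolutions/Day6.py | packetParser
-- ===== SOURCE A (Python) =====
-- def packetParser(input, numChars):
--     set = []
--     j = 0
--     for c in input:
--         if c in set:
--             set = set[set.index(c)+1:]
--         set.append(c)
--         j+=1
--         if len(set) >= numChars:
--             break
--
--     return j
-- ===== SOURCE B (Python) =====
-- def packetParser(input, numChars):
--     n = len(input)
--     if n == 0:
--         return 0
--     if numChars <= 1:
--         return 1
--     k = numChars
--     i = 0
--     while i + k <= n:
--         window = input[i:i+k]
--         seen = set()
--         dup = -1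
--         off = k - 1
--         for c in reversed(window):
--             if c in seen:
--                 dup = off
--                 break
--             seen.add(c)
--             off -= 1
--         if dup == -1:
--             return i + k
--         i = i + dup + 1
--     return n
-- ===== Notes on version B (the rewrite author's own statement) =====
-- stated objective: faster
-- what changed: Replaces A's incremental longest-distinct-suffix window (maintained list with a membership scan, list.index and re-slicing on every character) by the fixed-size-window jump algorithm: test each numChars-sized window for a duplicate scanning from the right and jump the window start past the earlier occurrence of the rightmost duplicate found.
import Mathlib
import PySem

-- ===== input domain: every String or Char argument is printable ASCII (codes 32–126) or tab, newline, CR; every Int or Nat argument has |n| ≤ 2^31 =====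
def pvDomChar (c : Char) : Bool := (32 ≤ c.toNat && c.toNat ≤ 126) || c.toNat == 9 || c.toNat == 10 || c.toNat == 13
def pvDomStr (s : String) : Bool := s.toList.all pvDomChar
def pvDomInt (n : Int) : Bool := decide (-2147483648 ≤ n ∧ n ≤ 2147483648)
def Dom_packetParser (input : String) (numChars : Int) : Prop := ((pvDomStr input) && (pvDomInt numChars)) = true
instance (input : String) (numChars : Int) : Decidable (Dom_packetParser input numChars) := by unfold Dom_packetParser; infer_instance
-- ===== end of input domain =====

-- B replaces A's incremental distinct-suffix window (maintained list, membership scan,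
-- list.index, re-slicing per character) by the fixed-size-window jump algorithm: test the
-- whole window [i, i+k) for a duplicate scanning from the right and, on failure, jump the
-- window start past the earlier occurrence of the rightmost duplicate (measured faster by
-- a timing run).

-- ===== PORT A =====
-- loop over the chars; state: the window list `set`, the counter j.
-- `set.index(c)` is guarded by `c in set`, so Python's first-index = List.idxOf;
-- the slice lower bound idx+1 is ≥ 0 and in range, matching PySem.List.slice.
def packetParserLoopA (cs : List Char) (s : List Char) (j : Int) (n : Int) : Int :=
  match cs with
  | [] => j
  | c :: rest =>
    let s1 := if c ∈ s then PySem.List.slice s (some ((s.idxOf c : Int) + 1)) none else s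
    let s2 := s1 ++ [c]
    let j1 := j + 1
    if n ≤ (s2.length : Int) then j1 else packetParserLoopA rest s2 j1 n

def packetParser (input : String) (numChars : Int) : Int :=
  packetParserLoopA input.toList [] 0 numChars

-- ===== PORT B =====
-- inner `for c in reversed(window)` loop: state = the set `seen` and the counter `off`;
-- returns `dup` (-1 when the loop falls through without a break).
def pvScanB (r : List Char) (off : Int) (seen : PySem.Set Char) : Int :=
  match r with
  | [] => -1
  | c :: rest =>
    if PySem.Set.contains seen c then off else pvScanB rest (off - 1) (PySem.Set.add seen c)

-- outer `while i + k <= n` loop; `fuel` is a totality guard only (the start index i grows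
-- by at least one per iteration, so `n+1` iterations always suffice — proved in the lemmas).
def pvLoopB (l : List Char) (n k : Int) : Nat → Int → Int
  | 0, _ => n
  | fuel + 1, i =>
    if i + k ≤ n then
      let window := PySem.List.slice l (some i) (some (i + k))
      let dup := pvScanB window.reverse (k - 1) PySem.Set.empty
      if dup = -1 then i + k else pvLoopB l n k fuel (i + dup + 1)
    else n

def packetParser_alt (input : String) (numChars : Int) : Int :=
  let l := input.toList
  let n : Int := l.length
  if n = 0 then 0
  else if numChars ≤ 1 then 1
  else pvLoopB l n numChars (n + 1).toNat 0

-- ===== PRECONDITION & SPEC =====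
def Spec_packetParser (input : String) (numChars : Int) (out : Int) : Prop := out = packetParser_alt input numChars
instance (input : String) (numChars : Int) (out : Int) : Decidable (Spec_packetParser input numChars out) := by unfold Spec_packetParser; infer_instance

-- ===== CLAIM (what is proved, stated in full; the proofs are below) =====
def Claim_equal_packetParser : Prop := ∀ (input : String) (numChars : Int), Dom_packetParser input numChars → Spec_packetParser input numChars (packetParser input numChars)

-- ===== LEMMAS AND PROOFS =====

-- the common reference value: the first window start i (from `start` upward) whose
-- K-char window of l has no duplicate
def pvFirstGood (l : List Char) (K : Nat) (start : Nat) : Option Nat :=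
  if _h : start + K ≤ l.length then
    (if ((l.drop start).take K).Nodup then some start else pvFirstGood l K (start + 1))
  else none
termination_by l.length + 1 - start
decreasing_by omega

def pvAns (l : List Char) (K : Nat) : Int :=
  match pvFirstGood l K 0 with
  | some i => (i : Int) + K
  | none => (l.length : Int)

-- window i' is bad (has a duplicate)
def pvBad (l : List Char) (K : Nat) (i : Nat) : Prop := ¬ ((l.drop i).take K).Nodup

theorem pvFirstGood_eq_some (l : List Char) (K : Nat) : ∀ d start i0,
    d = i0 - start →
    start ≤ i0 → i0 + K ≤ l.length → ((l.drop i0).take K).Nodup →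
    (∀ i', start ≤ i' → i' < i0 → pvBad l K i') →
    pvFirstGood l K start = some i0 := by
  intro d
  induction d with
  | zero =>
    intro start i0 hd h1 h2 h3 _
    have : start = i0 := by omega
    subst this
    rw [pvFirstGood, dif_pos h2, if_pos h3]
  | succ m ih =>
    intro start i0 hd h1 h2 h3 h4
    have hlt : start < i0 := by omega
    have hle : start + K ≤ l.length := by omega
    rw [pvFirstGood, dif_pos hle,
      if_neg (h4 start le_rfl hlt)]
    exact ih (start + 1) i0 (by omega) (by omega) h2 h3
      (fun i' hi1 hi2 => h4 i' (by omega) hi2)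

theorem pvFirstGood_eq_none (l : List Char) (K : Nat) : ∀ start,
    (∀ i', start ≤ i' → i' + K ≤ l.length → pvBad l K i') →
    pvFirstGood l K start = none := by
  intro start
  induction hfg : l.length + 1 - start using Nat.strong_induction_on generalizing start with
  | _ n ih =>
    intro h
    rw [pvFirstGood]
    by_cases hle : start + K ≤ l.length
    · rw [dif_pos hle, if_neg (h start le_rfl hle)]
      exact ih (l.length + 1 - (start + 1)) (by omega) (start + 1) rfl
        (fun i' hi1 hi2 => h i' (by omega) hi2)
    · rw [dif_neg hle]

-- ===== A-side machinery =====

-- s is the maximal duplicate-free suffix of p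
def pvMaxSuf (p s : List Char) : Prop :=
  s <:+ p ∧ s.Nodup ∧ (s = p ∨ ∃ t c0, p = t ++ c0 :: s ∧ c0 ∈ s)

-- a K-window of l ending exactly at the boundary of the prefix p is a suffix of p
theorem pvWindow_boundary (p rest : List Char) (K i : Nat) (h : i + K = p.length) :
    ((p ++ rest).drop i).take K = p.drop i := by
  rw [List.drop_append_of_le_length (by omega),
    List.take_append_of_le_length (by simp only [List.length_drop]; omega),
    List.take_of_length_le (by simp only [List.length_drop]; omega)]

-- every suffix of p longer than its maximal duplicate-free suffix has a duplicate
theorem pvMaxSuf_bad (p s : List Char) (h : pvMaxSuf p s) (m : Nat)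
    (h1 : s.length < m) (h2 : m ≤ p.length) : ¬ (p.drop (p.length - m)).Nodup := by
  obtain ⟨hsuf, hnd, hmax⟩ := h
  rcases hmax with heq | ⟨t, c0, hp, hc0⟩
  · subst heq
    omega
  · intro hgood
    have hlen : p.length = t.length + 1 + s.length := by
      rw [hp]; simp only [List.length_append, List.length_cons]; omega
    have hdrop : p.drop (p.length - m) = t.drop (p.length - m) ++ c0 :: s := by
      have hstep : p.drop (p.length - m) = (t ++ c0 :: s).drop (p.length - m) := by rw [← hp]
      rw [hstep, List.drop_append_of_le_length (by omega)]
    have hsub : (c0 :: s).Sublist (p.drop (p.length - m)) := by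
      rw [hdrop]
      exact (List.sublist_append_right _ _)
    have : (c0 :: s).Nodup := hsub.nodup hgood
    rw [List.nodup_cons] at this
    exact this.1 hc0

theorem pvA_loop (l : List Char) (K : Nat) (_hK : 2 ≤ K) :
    ∀ cs p s, l = p ++ cs → pvMaxSuf p s → s.length < K →
    (∀ i : Nat, i + K ≤ p.length → pvBad l K i) →
    packetParserLoopA cs s (p.length : Int) (K : Int) = pvAns l K := by
  intro cs
  induction cs with
  | nil =>
    intro p s hl _ _ hbad
    rw [packetParserLoopA]
    have : pvFirstGood l K 0 = none := by
      refine pvFirstGood_eq_none l K 0 (fun i' _ h2 => hbad i' ?_)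
      rw [hl] at h2
      simpa using h2
    rw [pvAns, this, hl]
    simp
  | cons c rest ih =>
    intro p s hl hms hslen hbad
    obtain ⟨hsuf, hnd, hmax⟩ := hms
    obtain ⟨t, ht⟩ := hsuf
    rw [packetParserLoopA]
    have hp' : l = (p ++ [c]) ++ rest := by rw [hl]; simp
    -- the updated window s2 and its maximal-suffix facts
    by_cases hc : c ∈ s
    · -- duplicate in the window list: A drops through the first occurrence
      set idx := s.idxOf c with hidx
      have hidxlt : idx < s.length := List.idxOf_lt_length_of_mem hc
      have hgetidx : s[idx] = c := List.getElem_idxOf hidxlt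
      have hsplit : s = s.take idx ++ c :: s.drop (idx + 1) := by
        conv_lhs => rw [← List.take_append_drop idx s]
        rw [List.drop_eq_getElem_cons hidxlt, hgetidx]
      have hslice : PySem.List.slice s (some ((idx : Int) + 1)) none = s.drop (idx + 1) := by
        have : ((idx : Int) + 1) = ((idx + 1 : Nat) : Int) := by push_cast; ring
        rw [this, PySem.List.slice_from_natCast]
      rw [if_pos hc, hslice]
      have hcnotin : c ∉ s.drop (idx + 1) := by
        intro hmem
        have hnd2 := hnd
        rw [hsplit, List.nodup_append, List.nodup_cons] at hnd2
        exact hnd2.2.1.1 hmem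
      set s2 := s.drop (idx + 1) ++ [c] with hs2
      have hs2nd : s2.Nodup := by
        rw [hs2, List.nodup_append]
        refine ⟨(List.drop_sublist _ _).nodup hnd, List.nodup_singleton c, ?_⟩
        intro x hx y hy
        rw [List.mem_singleton] at hy
        subst hy
        intro hxy
        exact hcnotin (hxy ▸ hx)
      have hs2len : s2.length = s.length - idx := by
        simp only [hs2, List.length_append, List.length_drop, List.length_singleton]
        omega
      have hms2 : pvMaxSuf (p ++ [c]) s2 := by
        refine ⟨⟨t ++ s.take (idx + 1), ?_⟩, hs2nd, Or.inr ⟨t ++ s.take idx, c, ?_, ?_⟩⟩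
        · rw [hs2, ← ht]
          conv_rhs => rw [← List.take_append_drop (idx + 1) s]
          simp only [List.append_assoc]
        · rw [← ht]
          conv_lhs => rw [hsplit]
          simp [hs2]
        · simp [hs2]
      have hnobreak : ¬ ((K : Int) ≤ (s2.length : Int)) := by
        have : s2.length < K := by omega
        omega
      rw [if_neg hnobreak]
      have hcast : (p.length : Int) + 1 = ((p ++ [c]).length : Int) := by simp
      rw [hcast]
      refine ih (p ++ [c]) s2 hp' hms2 (by omega) ?_
      intro i hi
      simp only [List.length_append, List.length_singleton] at hi
      by_cases hold : i + K ≤ p.length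
      · exact hbad i hold
      · -- the new window ending at p.length + 1 is a too-long suffix: it has a duplicate
        have hiK : i + K = p.length + 1 := by omega
        unfold pvBad
        rw [hp', pvWindow_boundary (p ++ [c]) rest K i (by simp; omega)]
        have := pvMaxSuf_bad (p ++ [c]) s2 hms2 K (by omega) (by simp; omega)
        have harith : (p ++ [c]).length - K = i := by simp; omega
        rwa [harith] at this
    · -- c not in the window: A appends
      rw [if_neg hc]
      set s2 := s ++ [c] with hs2
      have hs2nd : s2.Nodup := by
        rw [hs2, List.nodup_append]
        refine ⟨hnd, List.nodup_singleton c, ?_⟩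
        intro x hx y hy
        rw [List.mem_singleton] at hy
        subst hy
        intro hxy
        exact hc (hxy ▸ hx)
      have hs2len : s2.length = s.length + 1 := by simp [hs2]
      have hms2 : pvMaxSuf (p ++ [c]) s2 := by
        refine ⟨⟨t, by rw [hs2, ← ht]; simp⟩, hs2nd, ?_⟩
        rcases hmax with heq | ⟨t2, c0, hp2, hc0⟩
        · exact Or.inl (by rw [hs2, heq])
        · exact Or.inr ⟨t2, c0, by rw [hs2, hp2]; simp, List.mem_append.mpr (Or.inl hc0)⟩
      by_cases hbreak : (K : Int) ≤ (s2.length : Int)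
      · -- break: the window of length K ending here is exactly s2, duplicate-free
        rw [if_pos hbreak]
        have hs2K : s2.length = K := by
          push_cast at hbreak
          omega
        have hplen : K ≤ (p ++ [c]).length := by
          have : s2.length ≤ (p ++ [c]).length := by
            rw [hs2, ← ht]
            simp
          omega
        set i0 := (p ++ [c]).length - K with hi0
        have hwin : ((l.drop i0).take K) = s2 := by
          rw [hp', pvWindow_boundary (p ++ [c]) rest K i0 (by omega)]
          have : p ++ [c] = (t ++ s) ++ [c] := by rw [ht]
          rw [this]
          have h2 : ((t ++ s) ++ [c]) = t ++ s2 := by rw [hs2]; simp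
          rw [h2]
          have h3 : i0 = t.length := by
            have : (t ++ s2).length = t.length + s2.length := by simp
            rw [hi0]
            rw [← h2, this] at *
            simp [← ht, hs2] at *
            omega
          rw [h3, List.drop_left]
        have hplen' : K ≤ p.length + 1 := by simpa using hplen
        have hi0' : i0 = p.length + 1 - K := by
          rw [hi0]
          simp
        have hwin' : ((l.drop i0).take K).Nodup := by rw [hwin]; exact hs2nd
        have hll : l.length = p.length + 1 + rest.length := by
          rw [hl]
          simp only [List.length_append, List.length_cons]
          omega
        have hfg : pvFirstGood l K 0 = some i0 :=
          pvFirstGood_eq_some l K i0 0 i0 (by omega) (by omega) (by omega) hwin'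
            (fun i' _ hlt => hbad i' (by omega))
        rw [pvAns, hfg]
        push_cast
        omega
      · rw [if_neg hbreak]
        have hcast : (p.length : Int) + 1 = ((p ++ [c]).length : Int) := by simp
        rw [hcast]
        refine ih (p ++ [c]) s2 hp' hms2 (by omega) ?_
        intro i hi
        simp only [List.length_append, List.length_singleton] at hi
        by_cases hold : i + K ≤ p.length
        · exact hbad i hold
        · have hiK : i + K = p.length + 1 := by omega
          unfold pvBad
          rw [hp', pvWindow_boundary (p ++ [c]) rest K i (by simp; omega)]
          have := pvMaxSuf_bad (p ++ [c]) s2 hms2 K (by omega) (by simp; omega)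
          have harith : (p ++ [c]).length - K = i := by simp; omega
          rwa [harith] at this

-- ===== B-side machinery =====

-- a list with no element occurring among its predecessors has no duplicates
theorem pvNodup_of_not_mem_take (r : List Char)
    (h : ∀ idx (h : idx < r.length), r[idx] ∉ r.take idx) : r.Nodup := by
  rw [List.nodup_iff_injective_getElem]
  intro a b hab
  rcases a with ⟨a, ha⟩
  rcases b with ⟨b, hb⟩
  simp only [Fin.mk.injEq]
  rcases Nat.lt_trichotomy a b with h1 | h1 | h1
  · exact absurd (List.mem_take_iff_getElem.mpr ⟨a, by omega, hab⟩) (h b hb)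
  · exact h1
  · exact absurd (List.mem_take_iff_getElem.mpr ⟨b, by omega, hab.symm⟩) (h a ha)

-- two equal elements at distinct positions refute Nodup
theorem pvNot_nodup_of_eq (r : List Char) (a b : Nat) (hab : a < b) (hb : b < r.length)
    (heq : r[a]'(by omega) = r[b]) : ¬ r.Nodup := by
  intro hnd
  rw [List.nodup_iff_injective_getElem] at hnd
  have := hnd (a₁ := ⟨a, by omega⟩) (a₂ := ⟨b, hb⟩) heq
  simp only [Fin.mk.injEq] at this
  omega

theorem pvScan_spec (r : List Char) : ∀ (off : Int) (seen : PySem.Set Char),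
    (pvScanB r off seen = -1 ∧ ∀ idx (h : idx < r.length), r[idx] ∉ seen ∧ r[idx] ∉ r.take idx)
    ∨ (∃ idx, ∃ h : idx < r.length, pvScanB r off seen = off - idx ∧
        (r[idx] ∈ seen ∨ r[idx] ∈ r.take idx)) := by
  induction r with
  | nil => intro off seen; left; exact ⟨rfl, by intro idx h; simp at h⟩
  | cons c rest ih =>
    intro off seen
    by_cases hmem : c ∈ seen
    · right
      refine ⟨0, by simp, ?_, by simp [hmem]⟩
      simp [pvScanB, hmem]
    · rcases ih (off - 1) (PySem.Set.add seen c) with ⟨heq, hall⟩ | ⟨idx, hidx, heq, hm⟩ <;>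
        rw [PySem.Set.add_of_not_mem hmem] at heq
      · left
        refine ⟨by simp [pvScanB, hmem, heq], ?_⟩
        intro idx h
        match idx with
        | 0 => simpa using hmem
        | m + 1 =>
          have := hall m (by simpa using h)
          rw [PySem.Set.mem_add] at this
          simp only [List.getElem_cons_succ, List.take_succ_cons, List.mem_cons]
          constructor
          · exact this.1 ∘ Or.inl
          · rintro (h1 | h1)
            · exact this.1 (Or.inr h1)
            · exact this.2 h1
      · right
        refine ⟨idx + 1, by simpa using hidx, ?_, ?_⟩
        · have : pvScanB (c :: rest) off seen = pvScanB rest (off - 1) (seen ++ [c]) := by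
            simp [pvScanB, hmem]
          rw [this, heq]
          omega
        · rw [PySem.Set.mem_add] at hm
          simp only [List.getElem_cons_succ, List.take_succ_cons, List.mem_cons]
          tauto

theorem pvB_loop (l : List Char) (K : Nat) (hK : 2 ≤ K) :
    ∀ fuel (i : Nat), l.length - i < fuel →
    (∀ i' : Nat, i' < i → pvBad l K i') →
    pvLoopB l (l.length : Int) (K : Int) fuel (i : Int) = pvAns l K := by
  intro fuel
  induction fuel with
  | zero => intro i h; omega
  | succ fuel ih =>
    intro i hfuel hbad
    rw [pvLoopB]
    by_cases htest : i + K ≤ l.length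
    · rw [if_pos (by omega)]
      have hw : PySem.List.slice l (some (i : Int)) (some ((i : Int) + (K : Int))) =
          (l.drop i).take K := PySem.List.slice_natCast_add l i K
      simp only [hw]
      set w := (l.drop i).take K with hwdef
      have hwlen : w.length = K := by
        simp only [hwdef, List.length_take, List.length_drop]
        omega
      have hwelem : ∀ m, m < K → ∀ (h1 : m < w.length) (h2 : i + m < l.length),
          w[m] = l[i + m] := by
        intro m hm h1 h2
        simp only [hwdef, List.getElem_take, List.getElem_drop]
      have hrlen : w.reverse.length = K := by simp [hwlen]
      rcases pvScan_spec w.reverse ((K : Int) - 1) PySem.Set.empty with ⟨heq, hall⟩ | ⟨idx, hidx, heq, hm⟩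
      · -- no duplicate in the window: return i + K, and pvAns is exactly that
        rw [heq, if_pos rfl]
        have hnd : w.Nodup := by
          rw [← List.nodup_reverse]
          exact pvNodup_of_not_mem_take w.reverse (fun idx h => (hall idx h).2)
        have : pvFirstGood l K 0 = some i :=
          pvFirstGood_eq_some l K i 0 i (by omega) (by omega) htest hnd
            (fun i' _ h2 => hbad i' h2)
        rw [pvAns, this]
      · -- duplicate found: w[d] = w[q] with d < q < K; every start in [i, i+d] is bad
        rw [heq]
        have hidxK : idx < K := by omega
        rcases List.mem_take_iff_getElem.mp
            (hm.resolve_left (by simp [PySem.Set.empty])) with ⟨j, hj, hjeq⟩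
        have hjidx : j < idx := by omega
        -- positions in w
        have hjw : j < w.reverse.length := by omega
        have hrev : ∀ m, ∀ (h : m < w.reverse.length) (h2 : K - 1 - m < w.length),
            w.reverse[m] = w[K - 1 - m] := by
          intro m h h2
          rw [List.getElem_reverse]
          congr 1
          omega
        set d := K - 1 - idx with hd
        set q := K - 1 - j with hq
        have hdq : d < q := by omega
        have hqK : q < K := by omega
        have hweq : w[d]'(by omega) = w[q]'(by omega) := by
          rw [← hrev idx hidx (by omega), ← hrev j hjw (by omega)]
          exact hjeq.symm
        -- in l: l[i+d] = l[i+q]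
        have hleq : l[i + d]'(by omega) = l[i + q]'(by omega) := by
          rw [← hwelem d (by omega) (by omega) (by omega), ← hwelem q (by omega) (by omega) (by omega)]
          exact hweq
        have hdup : (K : Int) - 1 - idx ≠ -1 := by omega
        rw [if_neg hdup]
        have hcast : (i : Int) + ((K : Int) - 1 - (idx : Int)) + 1 = ((i + d + 1 : Nat) : Int) := by
          push_cast
          omega
        rw [hcast]
        refine ih (i + d + 1) (by omega) ?_
        intro i' hi'
        by_cases hlt : i' < i
        · exact hbad i' hlt
        · -- i ≤ i' ≤ i + d: the window at i' contains both duplicate positions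
          have h1 : i ≤ i' := by omega
          have h2 : i' ≤ i + d := by omega
          refine pvNot_nodup_of_eq ((l.drop i').take K) (i + d - i') (i + q - i') (by omega) ?_ ?_
          · simp only [List.length_take, List.length_drop]
            omega
          · have e1 : ((l.drop i').take K)[i + d - i']'(by simp; omega) = l[i' + (i + d - i')]'(by omega) := by
              simp only [List.getElem_take, List.getElem_drop]
            have e2 : ((l.drop i').take K)[i + q - i']'(by simp; omega) = l[i' + (i + q - i')]'(by omega) := by
              simp only [List.getElem_take, List.getElem_drop]
            rw [e1, e2]
            have c1 : i' + (i + d - i') = i + d := by omega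
            have c2 : i' + (i + q - i') = i + q := by omega
            simp only [c1, c2]
            exact hleq
    · rw [if_neg (by omega)]
      have : pvFirstGood l K 0 = none :=
        pvFirstGood_eq_none l K 0 (fun i' _ h2 => hbad i' (by omega))
      rw [pvAns, this]

-- ===== VERDICT (by name: the statement is the Claim_ definition above) =====
theorem packetParser_spec : Claim_equal_packetParser := by
  intro input numChars _
  unfold Spec_packetParser packetParser packetParser_alt
  cases hls : input.toList with
  | nil =>
    rw [packetParserLoopA]
    simp
  | cons c rest =>
    set l := c :: rest with hldef
    have hlen0 : l.length = rest.length + 1 := by simp [hldef]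
    have hn0 : ¬ ((l.length : Int) = 0) := by
      rw [hlen0]
      push_cast
      omega
    by_cases h1 : numChars ≤ 1
    · -- numChars <= 1: A breaks after the first character, B returns 1 directly
      rw [if_neg hn0, if_pos h1, packetParserLoopA]
      simp only [List.not_mem_nil, if_false, List.nil_append, List.length_cons,
        List.length_nil]
      rw [if_pos (by omega)]
      norm_num
    · have h2 : 2 ≤ numChars := by omega
      set K := numChars.toNat with hKdef
      have hKcast : (K : Int) = numChars := by
        rw [hKdef]
        exact Int.toNat_of_nonneg (by omega)
      have hK2 : 2 ≤ K := by omega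
      have hA : packetParserLoopA l [] (([] : List Char).length : Int) (K : Int) = pvAns l K := by
        refine pvA_loop l K hK2 l [] [] (by simp) ⟨List.nil_suffix, List.nodup_nil, ?_⟩
          (by rw [List.length_nil]; omega)
          (fun i hi => by rw [List.length_nil] at hi; omega)
        exact Or.inl rfl
      simp only [List.length_nil, Nat.cast_zero] at hA
      rw [hKcast] at hA
      rw [hA, if_neg hn0, if_neg h1]
      have hfuel : ((l.length : Int) + 1).toNat = l.length + 1 := by omega
      have hB := pvB_loop l K hK2 (l.length + 1) 0 (by omega) (fun i' hi' => absurd hi' (by omega))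
      simp only [Nat.cast_zero] at hB
      rw [hKcast] at hB
      rw [hfuel, hB]
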